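-- pv_equiv track=rewrite | github.com/PurthaShaariyaar/OA | test/p1.py | numValidWords
-- ===== SOURCE A (Python) =====
-- def numValidWords(s):
--
--   def is_valid_word(word):
--     vowels = set("aeiouAEIOU")
--     consonants = set("bcdfghjklmnpqrstvwxyzBCDFGHJKLMNPQRSTVWXYZ")
--
--     has_alpha = any(char.isalnum() for char in word)
--     has_vowel = any(char in vowels for char in word)
--     has_consonant = any(char in consonants for char in word)
--
--     return has_alpha and has_vowel and has_consonant and len(word) >= 3
--
--   words = s.split()
--   valid_word_count = sum(is_valid_word(word) for word in words)
--   return valid_word_count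
-- ===== SOURCE B (Python) =====
-- def numValidWords(s):
--     VOWELS = "aeiouAEIOU"
--     CONSONANTS = "bcdfghjklmnpqrstvwxyzBCDFGHJKLMNPQRSTVWXYZ"
--     count = 0
--     for word in s.split():
--         has_vowel = False
--         has_consonant = False
--         for ch in word:
--             if ch in VOWELS:
--                 has_vowel = True
--             elif ch in CONSONANTS:
--                 has_consonant = True
--             if has_vowel and has_consonant:
--                 break
--         if has_vowel and has_consonant and len(word) >= 3:
--             count += 1
--     return count
-- ===== Notes on version B (the rewrite author's own statement) =====
-- stated objective: alternative
-- what changed: B fuses A's three separate any()-scans per word into a single early-exiting flag-updating pass over the word's characters, dropping the redundant isalnum scan (a vowel is already alphanumeric) and counting with an explicit accumulator instead of sum over a generator.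
import Mathlib
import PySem

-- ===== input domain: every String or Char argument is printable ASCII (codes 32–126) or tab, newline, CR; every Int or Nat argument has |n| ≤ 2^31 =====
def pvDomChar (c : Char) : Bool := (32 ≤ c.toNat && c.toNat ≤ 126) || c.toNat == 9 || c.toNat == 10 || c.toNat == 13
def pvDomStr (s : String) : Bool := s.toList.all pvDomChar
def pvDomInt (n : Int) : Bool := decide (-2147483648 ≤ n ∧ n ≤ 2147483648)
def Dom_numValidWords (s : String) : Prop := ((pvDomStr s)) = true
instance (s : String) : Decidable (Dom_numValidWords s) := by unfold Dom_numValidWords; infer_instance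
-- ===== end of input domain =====

-- B fuses A's three per-word any()-scans into one early-exiting flag pass (dropping the
-- redundant isalnum scan, since a vowel is alphanumeric) — alternative decomposition, same cost.


-- ===== PORT A =====
def pvVowels : List Char := "aeiouAEIOU".toList
def pvConsonants : List Char := "bcdfghjklmnpqrstvwxyzBCDFGHJKLMNPQRSTVWXYZ".toList

def isValidWordA (word : String) : Bool :=
  let vowels : PySem.Set Char := PySem.Set.ofList pvVowels
  let consonants : PySem.Set Char := PySem.Set.ofList pvConsonants
  let has_alpha := word.toList.any (fun c => PySem.Chars.isalnum c)
  let has_vowel := word.toList.any (fun c => PySem.Set.contains vowels c)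
  let has_consonant := word.toList.any (fun c => PySem.Set.contains consonants c)
  has_alpha && has_vowel && has_consonant && decide (PySem.Str.len word ≥ 3)

def numValidWords (s : String) : Int :=
  (PySem.Str.split₀ s).foldl (fun acc w => acc + (if isValidWordA w then 1 else 0)) 0

-- ===== PORT B =====
-- `ch in VOWELS` on a single character is membership of that character (exact here).
def bScan : List Char → Bool → Bool → Bool × Bool
  | [], hv, hc => (hv, hc)
  | c :: cs, hv, hc =>
    let hv' := if pvVowels.contains c then true else hv
    let hc' := if !pvVowels.contains c && pvConsonants.contains c then true else hc
    if hv' && hc' then (hv', hc') else bScan cs hv' hc'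

def numValidWords_alt (s : String) : Int :=
  (PySem.Str.split₀ s).foldl
    (fun count w =>
      let p := bScan w.toList false false
      if p.1 && p.2 && decide (PySem.Str.len w ≥ 3) then count + 1 else count) 0

-- ===== PRECONDITION & SPEC =====
def Spec_numValidWords (s : String) (out : Int) : Prop := out = numValidWords_alt s
instance (s : String) (out : Int) : Decidable (Spec_numValidWords s out) := by unfold Spec_numValidWords; infer_instance

-- ===== CLAIM (what is proved, stated in full; the proofs are below) =====
def Claim_equal_numValidWords : Prop := ∀ (s : String), Dom_numValidWords s → Spec_numValidWords s (numValidWords s)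

-- ===== LEMMAS AND PROOFS =====

-- every consonant is not a vowel
theorem cons_not_vowel {c : Char} (h : pvConsonants.contains c = true) :
    pvVowels.contains c = false := by
  have : pvConsonants.all (fun c => !pvVowels.contains c) = true := by decide
  rw [List.all_eq_true] at this
  have := this c (by simpa using h)
  simpa using this

-- the early-exit flag scan computes the two any-scans
theorem bScan_eq (cs : List Char) : ∀ hv hc : Bool,
    bScan cs hv hc = (hv || cs.any (fun c => pvVowels.contains c),
                      hc || cs.any (fun c => pvConsonants.contains c)) := by
  induction cs with
  | nil => intro hv hc; simp [bScan]
  | cons c cs ih =>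
    intro hv hc
    simp only [bScan, List.any_cons]
    cases hV : pvVowels.contains c <;> cases hC : pvConsonants.contains c <;>
      first
        | (rw [cons_not_vowel hC] at hV; exact Bool.noConfusion hV)
        | (cases hv <;> cases hc <;> simp [ih])

-- every vowel is alphanumeric
theorem vowel_alnum {c : Char} (h : pvVowels.contains c = true) :
    PySem.Chars.isalnum c = true := by
  have : pvVowels.all (fun c => PySem.Chars.isalnum c) = true := by decide
  rw [List.all_eq_true] at this
  exact this c (by simpa using h)

set_option maxRecDepth 8000 in
theorem word_eq (w : String) :
    isValidWordA w =
      ((bScan w.toList false false).1 && (bScan w.toList false false).2 &&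
        decide (PySem.Str.len w ≥ 3)) := by
  rw [bScan_eq]
  simp only [isValidWordA, PySem.Set.contains]
  have hset : (PySem.Set.ofList pvVowels : List Char) = pvVowels := by decide
  have hset2 : (PySem.Set.ofList pvConsonants : List Char) = pvConsonants := by decide
  rw [hset, hset2]
  simp only [Bool.false_or]
  cases hV : w.toList.any (fun c => pvVowels.contains c)
  · simp
  · have halnum : w.toList.any (fun c => PySem.Chars.isalnum c) = true := by
      rw [List.any_eq_true] at hV ⊢
      obtain ⟨c, hc, hcv⟩ := hV
      exact ⟨c, hc, vowel_alnum hcv⟩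
    simp [halnum]

theorem fold_eq (l : List String) : ∀ a : Int,
    l.foldl (fun acc w => acc + (if isValidWordA w then 1 else 0)) a =
    l.foldl (fun count w =>
      let p := bScan w.toList false false
      if p.1 && p.2 && decide (PySem.Str.len w ≥ 3) then count + 1 else count) a := by
  induction l with
  | nil => intro a; rfl
  | cons w l ih =>
    intro a
    simp only [List.foldl_cons, word_eq w]
    rw [ih]
    congr 1
    split <;> simp

-- ===== VERDICT (by name: the statement is the Claim_ definition above) =====
theorem numValidWords_spec : Claim_equal_numValidWords := by
  intro s _
  unfold Spec_numValidWords numValidWords numValidWords_alt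
  exact fold_eq _ 0
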